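-- pv_equiv track=rewrite | github.com/OpenRaiser/NanoResearch | nanoresearch/agents/execution.py | _command_option_present
-- ===== SOURCE A (Python) =====
-- def _command_option_present(tokens: list[str], options: list[str]) -> tuple[str, int, str]:
--     for option in options:
--         for index, token in enumerate(tokens):
--             if token == option:
--                 value = tokens[index + 1] if index + 1 < len(tokens) else ""
--                 return option, index, value
--             if token.startswith(f"{option}="):
--                 return option, index, token.split("=", 1)[1]
--     return "", -1, ""
-- ===== SOURCE B (Python) =====
-- def _eq_prefix_keys(token):
--     # all option strings k such that k + "=" is a prefix of token
--     keys = []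
--     base = ""
--     rest = token
--     parts = rest.split("=", 1)
--     while len(parts) == 2:
--         head, rest = parts
--         keys.append(base + head)
--         base = base + head + "="
--         parts = rest.split("=", 1)
--     return keys
--
--
-- def _command_option_present(tokens: list[str], options: list[str]) -> tuple[str, int, str]:
--     # One pass over tokens builds two first-occurrence indexes: exact_first
--     # maps a token to its first (index, following-token) and prefix_first maps
--     # each "key" of a "key=value" token to its first (index, value).  Then a
--     # scan over options returns the first option with a match, the earlier of
--     # its exact and prefix hits winning.
--     exact_first = {}
--     prefix_first = {}
--     for index, token in enumerate(tokens):
--         exact_first.setdefault(token, (index, tokens[index + 1] if index + 1 < len(tokens) else ""))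
--         keys = _eq_prefix_keys(token)
--         if keys:
--             value = token.split("=", 1)[1]
--             for key in keys:
--                 prefix_first.setdefault(key, (index, value))
--     for option in options:
--         exact = exact_first.get(option)
--         pref = prefix_first.get(option)
--         if exact is not None and (pref is None or exact[0] < pref[0]):
--             return (option,) + exact
--         if pref is not None:
--             return (option,) + pref
--     return "", -1, ""
-- ===== Notes on version B (the rewrite author's own statement) =====
-- stated objective: alternative
-- what changed: B replaces A's option-major nested scans (restarting over all tokens for every option) by one token-major pass that builds two first-occurrence dicts (exact token hits, and key->value hits for every '='-prefix of each token), then resolves each option with two dict lookups taking the earlier hit.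
import Mathlib
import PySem

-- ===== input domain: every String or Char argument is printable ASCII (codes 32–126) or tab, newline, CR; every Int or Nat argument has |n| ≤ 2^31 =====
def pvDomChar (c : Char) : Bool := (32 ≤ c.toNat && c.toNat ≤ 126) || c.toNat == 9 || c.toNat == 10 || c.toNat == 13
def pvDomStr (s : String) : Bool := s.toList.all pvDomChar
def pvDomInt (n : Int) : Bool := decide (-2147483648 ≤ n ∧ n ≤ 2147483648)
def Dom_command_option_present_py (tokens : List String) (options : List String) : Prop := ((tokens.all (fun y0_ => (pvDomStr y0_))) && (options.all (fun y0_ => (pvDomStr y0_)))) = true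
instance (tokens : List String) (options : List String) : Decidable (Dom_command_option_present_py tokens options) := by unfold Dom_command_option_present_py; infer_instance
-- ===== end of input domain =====

-- B replaces A's option-major nested scans (restarting over tokens for every option) by a
-- single token-major pass building two first-occurrence dicts (exact token hits and
-- "key=value" prefix hits), then one lookup pass over options (objective: alternative).

-- ===== PORT A =====
-- inner 'for index, token in enumerate(tokens)' loop of A, for one option
def pvAFind (tokens : List String) (option : String) : List (Int × String) → Option (String × Int × String)
  | [] => none
  | (index, token) :: rest =>
    if token == option then
      some (option, index, if index + 1 < (tokens.length : Int) then PySem.List.pyGetD tokens (index + 1) "" else "")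
    else if PySem.Str.startswith token (option ++ "=") then
      some (option, index, PySem.List.pyGetD ((PySem.Str.splitMax? token "=" 1).getD []) 1 "")
    else pvAFind tokens option rest

-- outer 'for option in options' loop of A
def pvAOuter (tokens : List String) : List String → String × Int × String
  | [] => ("", -1, "")
  | option :: rest =>
    match pvAFind tokens option (PySem.List.enumerate tokens) with
    | some r => r
    | none => pvAOuter tokens rest

def command_option_present_py (tokens : List String) (options : List String) : String × Int × String :=
  pvAOuter tokens options

-- ===== PORT B =====
-- The next block of lemmas characterises str.split(sep, 1) of the PySem prelude; the port
-- pvEqKeysGo below cites pvRestShorter for its termination.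

-- splitOnMax.go with maxsplit exhausted returns the remainder as the last piece
theorem pvGoZero (sep : List Char) (fuel : Nat) (l cur : List Char) (acc : List (List Char)) :
    PySem.Chars.splitOnMax.go sep fuel 0 l cur acc = ((cur.reverse ++ l) :: acc).reverse := by
  cases fuel with
  | zero => simp [PySem.Chars.splitOnMax.go]
  | succ f => cases l with
    | nil => simp [PySem.Chars.splitOnMax.go]
    | cons c rest => simp [PySem.Chars.splitOnMax.go]

theorem pvGoOne (l : List Char) : ∀ (fuel : Nat), l.length < fuel → ∀ (cur : List Char) (acc : List (List Char)),
    PySem.Chars.splitOnMax.go ['='] fuel 1 l cur acc =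
      if '=' ∈ l then ((l.dropWhile (· ≠ '=')).tail :: (cur.reverse ++ l.takeWhile (· ≠ '=')) :: acc).reverse
      else ((cur.reverse ++ l) :: acc).reverse := by
  induction l with
  | nil =>
    intro fuel hf cur acc
    cases fuel with
    | zero => omega
    | succ f => simp [PySem.Chars.splitOnMax.go]
  | cons c rest ih =>
    intro fuel hf cur acc
    cases fuel with
    | zero => omega
    | succ f =>
      by_cases hc : c = '='
      · subst hc
        simp only [PySem.Chars.splitOnMax.go, List.isPrefixOf]
        rw [if_neg (by omega)]
        simp [pvGoZero, List.dropWhile, List.takeWhile]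
      · have hpre : List.isPrefixOf ['='] (c :: rest) = false := by
          simp [List.isPrefixOf]
          intro h; exact absurd h.symm hc
        simp only [PySem.Chars.splitOnMax.go]
        rw [if_neg (by omega)]
        rw [hpre]
        simp only [Bool.false_eq_true, if_false]
        rw [ih f (by simpa using Nat.lt_of_succ_lt_succ hf) (c :: cur) acc]
        have hc' : ¬ '=' = c := fun h => hc h.symm
        by_cases hm : '=' ∈ rest
        · simp [hm, hc, hc', List.dropWhile, List.takeWhile]
        · simp [hm, hc', List.takeWhile]

theorem pvSplitMax1_chars (cs : List Char) :
    PySem.Chars.splitOnMax cs ['='] 1 =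
      if '=' ∈ cs then [cs.takeWhile (· ≠ '='), (cs.dropWhile (· ≠ '=')).tail] else [cs] := by
  unfold PySem.Chars.splitOnMax
  rw [if_neg (by omega)]
  rw [show Int.toNat 1 = 1 from rfl, pvGoOne cs (cs.length + 1) (by omega) [] []]
  by_cases hm : '=' ∈ cs <;> simp [hm]

theorem pvSplitMax1_str (t : String) :
    (PySem.Str.splitMax? t "=" 1).getD [] =
      if '=' ∈ t.toList then
        [String.ofList (t.toList.takeWhile (· ≠ '=')), String.ofList ((t.toList.dropWhile (· ≠ '=')).tail)]
      else [t] := by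
  unfold PySem.Str.splitMax? PySem.Chars.splitMax?
  rw [show ("=" : String).toList = ['='] from rfl]
  rw [if_neg (by simp)]
  rw [pvSplitMax1_chars]
  by_cases hm : '=' ∈ t.toList <;> simp [hm]

theorem pvRestShorter (t : String) (h : '=' ∈ t.toList) :
    (String.ofList ((t.toList.dropWhile (· ≠ '=')).tail)).length < t.length := by
  have h1 : (t.toList.dropWhile (· ≠ '=')) ≠ [] := by
    intro hnil
    have := List.dropWhile_eq_nil_iff.mp hnil '=' h
    simp at this
  have h2 : (t.toList.dropWhile (· ≠ '=')).length ≤ t.toList.length := List.length_dropWhile_le _ _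
  have h3 : (t.toList.dropWhile (· ≠ '=')).length ≠ 0 := by
    simpa using h1
  have h4 : t.toList.length = t.length := by simp
  rw [String.length_ofList, List.length_tail]
  omega

theorem pvGetD2_1 (a b : String) : PySem.List.pyGetD [a, b] (1 : Int) "" = b := by
  simp [PySem.List.pyGetD, PySem.List.pyGet?, PySem.List.pyIdx?]

theorem pvParts_of_mem (rest : String) (hm : '=' ∈ rest.toList) :
    (PySem.Str.splitMax? rest "=" 1).getD [] =
      [String.ofList (rest.toList.takeWhile (· ≠ '=')), String.ofList ((rest.toList.dropWhile (· ≠ '=')).tail)] := by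
  rw [pvSplitMax1_str, if_pos hm]

theorem pvParts_of_not_mem (rest : String) (hm : '=' ∉ rest.toList) :
    (PySem.Str.splitMax? rest "=" 1).getD [] = [rest] := by
  rw [pvSplitMax1_str, if_neg hm]

-- the 'while len(parts) == 2' loop of B's _eq_prefix_keys
def pvEqKeysGo (base rest : String) (keys : List String) : List String :=
  if h2 : ((PySem.Str.splitMax? rest "=" 1).getD []).length = 2 then
    pvEqKeysGo (base ++ PySem.List.pyGetD ((PySem.Str.splitMax? rest "=" 1).getD []) 0 "" ++ "=")
      (PySem.List.pyGetD ((PySem.Str.splitMax? rest "=" 1).getD []) 1 "")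
      (keys ++ [base ++ PySem.List.pyGetD ((PySem.Str.splitMax? rest "=" 1).getD []) 0 ""])
  else keys
termination_by rest.length
decreasing_by
  by_cases hm : '=' ∈ rest.toList
  · rw [pvParts_of_mem rest hm, pvGetD2_1]
    exact pvRestShorter rest hm
  · rw [pvParts_of_not_mem rest hm] at h2
    simp at h2

-- B's _eq_prefix_keys
def pvEqPrefixKeys (token : String) : List String := pvEqKeysGo "" token []

-- the 'for index, token in enumerate(tokens)' pass of B building both dicts
def pvBBuild (tokens : List String) :
    List (Int × String) → PySem.Dict String (Int × String) → PySem.Dict String (Int × String) →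
      PySem.Dict String (Int × String) × PySem.Dict String (Int × String)
  | [], ef, pf => (ef, pf)
  | (index, token) :: rest, ef, pf =>
    pvBBuild tokens rest
      (ef.setdefault token (index, if index + 1 < (tokens.length : Int) then PySem.List.pyGetD tokens (index + 1) "" else ""))
      (if (pvEqPrefixKeys token).isEmpty then pf
       else (pvEqPrefixKeys token).foldl
         (fun d key => d.setdefault key (index, PySem.List.pyGetD ((PySem.Str.splitMax? token "=" 1).getD []) 1 "")) pf)

-- the 'for option in options' lookup pass of B
def pvBResolve2 (ef pf : PySem.Dict String (Int × String)) : List String → String × Int × String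
  | [] => ("", -1, "")
  | option :: rest =>
    match ef.get? option, pf.get? option with
    | some e, some p => if e.1 < p.1 then (option, e.1, e.2) else (option, p.1, p.2)
    | some e, none => (option, e.1, e.2)
    | none, some p => (option, p.1, p.2)
    | none, none => pvBResolve2 ef pf rest

def command_option_present_py_alt (tokens : List String) (options : List String) : String × Int × String :=
  pvBResolve2 (pvBBuild tokens (PySem.List.enumerate tokens) PySem.Dict.empty PySem.Dict.empty).1
    (pvBBuild tokens (PySem.List.enumerate tokens) PySem.Dict.empty PySem.Dict.empty).2 options

-- ===== PRECONDITION & SPEC =====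
def Spec_command_option_present_py (tokens : List String) (options : List String) (out : String × Int × String) : Prop := out = command_option_present_py_alt tokens options
instance (tokens : List String) (options : List String) (out : String × Int × String) : Decidable (Spec_command_option_present_py tokens options out) := by unfold Spec_command_option_present_py; infer_instance

-- ===== CLAIM (what is proved, stated in full; the proofs are below) =====
def Claim_equal_command_option_present_py : Prop := ∀ (tokens : List String) (options : List String), Dom_command_option_present_py tokens options → Spec_command_option_present_py tokens options (command_option_present_py tokens options)

-- ===== LEMMAS AND PROOFS =====

theorem pvGetD2_0 (a b : String) : PySem.List.pyGetD [a, b] (0 : Int) "" = a := by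
  simp [PySem.List.pyGetD, PySem.List.pyGet?, PySem.List.pyIdx?]

theorem pvDecomp (cs : List Char) (h : '=' ∈ cs) :
    cs = cs.takeWhile (· ≠ '=') ++ '=' :: (cs.dropWhile (· ≠ '=')).tail := by
  induction cs with
  | nil => simp at h
  | cons c rest ih =>
    by_cases hc : c = '='
    · subst hc; simp [List.takeWhile, List.dropWhile]
    · have hc' : ¬ '=' = c := fun hx => hc hx.symm
      have hm : '=' ∈ rest := by
        rcases List.mem_cons.mp h with h1 | h1
        · exact absurd h1 hc'
        · exact h1
      simp only [List.takeWhile, List.dropWhile]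
      rw [show (decide (c ≠ '=')) = true by simp [hc]]
      simpa using ih hm

theorem pvNotMemTakeWhile (cs : List Char) : '=' ∉ cs.takeWhile (· ≠ '=') := by
  intro h
  have := List.mem_takeWhile_imp h
  simp at this

theorem pvPrefixEqSplit (b : List Char) : ∀ (kl a : List Char), '=' ∉ b →
    ((kl ++ ['=']) <+: (b ++ '=' :: a) ↔ kl = b ∨ ∃ kl', kl = b ++ '=' :: kl' ∧ (kl' ++ ['=']) <+: a) := by
  induction b with
  | nil =>
    intro kl a _
    cases kl with
    | nil => simp
    | cons c kl' =>
      constructor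
      · intro hp
        obtain ⟨ts, hts⟩ := hp
        simp only [List.cons_append, List.nil_append] at hts
        obtain ⟨hc, hrest⟩ := List.cons.inj hts
        subst hc
        right
        exact ⟨kl', rfl, ⟨ts, hrest⟩⟩
      · rintro (h | ⟨kl'', hk, hp⟩)
        · simp at h
        · simp only [List.nil_append] at hk
          obtain ⟨hc, hrest⟩ := List.cons.inj hk
          subst hc; subst hrest
          obtain ⟨ts, hts⟩ := hp
          exact ⟨ts, by simp [hts]⟩
  | cons c b' ih =>
    intro kl a hb
    have hcne : c ≠ '=' := fun h => hb (h ▸ List.mem_cons_self)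
    have hb' : '=' ∉ b' := fun h => hb (List.mem_cons_of_mem _ h)
    cases kl with
    | nil =>
      constructor
      · intro hp
        obtain ⟨ts, hts⟩ := hp
        simp only [List.nil_append, List.cons_append] at hts
        exact absurd (List.cons.inj hts).1.symm hcne
      · rintro (h | ⟨kl', hk, _⟩)
        · exact absurd h.symm (by simp)
        · simp at hk
    | cons d kl' =>
      constructor
      · intro hp
        obtain ⟨ts, hts⟩ := hp
        simp only [List.cons_append] at hts
        obtain ⟨hdc, hrest⟩ := List.cons.inj hts
        subst hdc
        have hp' : (kl' ++ ['=']) <+: (b' ++ '=' :: a) := ⟨ts, hrest⟩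
        rcases (ih kl' a hb').mp hp' with h | ⟨kl'', hk, hpp⟩
        · left; rw [h]
        · right; exact ⟨kl'', by rw [hk]; simp, hpp⟩
      · rintro (h | ⟨kl'', hk, hpp⟩)
        · rw [h]
          exact ⟨a, by simp⟩
        · simp only [List.cons_append] at hk
          obtain ⟨hdc, hrest⟩ := List.cons.inj hk
          subst hdc
          have := (ih kl' a hb').mpr (Or.inr ⟨kl'', hrest, hpp⟩)
          obtain ⟨ts, hts⟩ := this
          exact ⟨ts, by simp [hts]⟩

theorem pvEqKeysGo_mem (n : Nat) : ∀ (rest : String), rest.length ≤ n → ∀ (base : String) (keys : List String) (o : String),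
    (o ∈ pvEqKeysGo base rest keys ↔ o ∈ keys ∨ ∃ k : String, o = base ++ k ∧ (k.toList ++ ['=']) <+: rest.toList) := by
  induction n with
  | zero =>
    intro rest hn base keys o
    have hre : rest.toList = [] := by
      have h1 : rest.toList.length = rest.length := by simp
      have : rest.toList.length = 0 := by omega
      simpa using this
    have hm : '=' ∉ rest.toList := by rw [hre]; simp
    rw [pvEqKeysGo, dif_neg (by rw [pvParts_of_not_mem rest hm]; simp)]
    simp [hre]
  | succ n ih =>
    intro rest hn base keys o
    by_cases hm : '=' ∈ rest.toList
    · rw [pvEqKeysGo, dif_pos (by rw [pvParts_of_mem rest hm]; rfl)]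
      rw [pvParts_of_mem rest hm, pvGetD2_0, pvGetD2_1]
      set bf := rest.toList.takeWhile (· ≠ '=') with hbf
      set af := (rest.toList.dropWhile (· ≠ '=')).tail with haf
      have hlen : (String.ofList af).length ≤ n := by
        have h5 := pvRestShorter rest hm
        rw [← haf] at h5
        omega
      rw [ih _ hlen]
      have hdecomp : rest.toList = bf ++ '=' :: af := pvDecomp rest.toList hm
      have hnb : '=' ∉ bf := pvNotMemTakeWhile rest.toList
      constructor
      · rintro (hk | ⟨k, hok, hpk⟩)
        · rcases List.mem_append.mp hk with hk1 | hk2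
          · exact Or.inl hk1
          · right
            refine ⟨String.ofList bf, by simpa using hk2, ?_⟩
            rw [String.toList_ofList, hdecomp]
            exact (pvPrefixEqSplit bf bf af hnb).mpr (Or.inl rfl)
        · right
          refine ⟨String.ofList bf ++ "=" ++ k, by simp [hok, String.append_assoc], ?_⟩
          rw [hdecomp]
          refine (pvPrefixEqSplit bf _ af hnb).mpr (Or.inr ⟨k.toList, ?_, ?_⟩)
          · simp
          · rw [String.toList_ofList] at hpk
            exact hpk
      · rintro (hk | ⟨k, hok, hpk⟩)
        · exact Or.inl (List.mem_append.mpr (Or.inl hk))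
        · rw [hdecomp] at hpk
          rcases (pvPrefixEqSplit bf _ af hnb).mp hpk with heq | ⟨kl', hkl, hpp⟩
          · left
            refine List.mem_append.mpr (Or.inr ?_)
            have : k = String.ofList bf := by
              rw [← heq]; exact (String.ofList_toList).symm
            simp [hok, this]
          · right
            refine ⟨String.ofList kl', ?_, by simp only [String.toList_ofList]; exact hpp⟩
            rw [hok]
            have : k = String.ofList bf ++ "=" ++ String.ofList kl' := by
              have hT : k.toList = (String.ofList bf ++ "=" ++ String.ofList kl').toList := by
                simp [hkl]
              calc k = String.ofList k.toList := (String.ofList_toList).symm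
                _ = _ := by rw [hT, String.ofList_toList]
            rw [this]
            simp [String.append_assoc]
    · rw [pvEqKeysGo, dif_neg (by rw [pvParts_of_not_mem rest hm]; simp)]
      constructor
      · exact Or.inl
      · rintro (hk | ⟨k, hok, hpk⟩)
        · exact hk
        · exact absurd (hpk.mem (by simp)) hm

-- membership in B's prefix keys is exactly A's startswith test
theorem pvKeys_mem (token o : String) :
    o ∈ pvEqPrefixKeys token ↔ PySem.Str.startswith token (o ++ "=") = true := by
  unfold pvEqPrefixKeys
  rw [pvEqKeysGo_mem token.length token le_rfl]
  simp only [List.not_mem_nil, false_or]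
  rw [show PySem.Str.startswith token (o ++ "=") = PySem.Chars.startswith token.toList (o ++ "=").toList from rfl]
  rw [PySem.Chars.startswith_iff]
  constructor
  · rintro ⟨k, hok, hp⟩
    have : o = k := by simpa using hok
    subst this
    simpa using hp
  · intro hp
    exact ⟨o, by simp, by simpa using hp⟩

-- the per-(index,token) contribution, as A's branches compute it
def pvMatch (tokens : List String) (index : Int) (token : String) (option : String) : Option (Int × String) :=
  if token == option then
    some (index, if index + 1 < (tokens.length : Int) then PySem.List.pyGetD tokens (index + 1) "" else "")
  else if PySem.Str.startswith token (option ++ "=") then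
    some (index, PySem.List.pyGetD ((PySem.Str.splitMax? token "=" 1).getD []) 1 "")
  else none

-- first match of an option in a token list (A's inner scan, value-level)
def pvFFind (tokens : List String) (option : String) : List (Int × String) → Option (Int × String)
  | [] => none
  | (index, token) :: rest =>
    match pvMatch tokens index token option with
    | some m => some m
    | none => pvFFind tokens option rest

theorem pvAFind_eq (tokens : List String) (option : String) (lst : List (Int × String)) :
    pvAFind tokens option lst = (pvFFind tokens option lst).map (fun m => (option, m.1, m.2)) := by
  induction lst with
  | nil => rfl
  | cons p rest ih =>
    obtain ⟨index, token⟩ := p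
    simp only [pvAFind, pvFFind, pvMatch]
    split_ifs <;> simp [ih]

-- first exact hit and first prefix hit of an option
def pvFirstE (tokens : List String) (option : String) : List (Int × String) → Option (Int × String)
  | [] => none
  | (index, token) :: rest =>
    if token == option then
      some (index, if index + 1 < (tokens.length : Int) then PySem.List.pyGetD tokens (index + 1) "" else "")
    else pvFirstE tokens option rest

def pvFirstP (option : String) : List (Int × String) → Option (Int × String)
  | [] => none
  | (index, token) :: rest =>
    if PySem.Str.startswith token (option ++ "=") then
      some (index, PySem.List.pyGetD ((PySem.Str.splitMax? token "=" 1).getD []) 1 "")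
    else pvFirstP option rest

theorem pvBBuild_fst_get? (tokens : List String) (o : String) :
    ∀ (lst : List (Int × String)) (ef pf : PySem.Dict String (Int × String)),
      (pvBBuild tokens lst ef pf).1.get? o = (ef.get? o).or (pvFirstE tokens o lst) := by
  intro lst
  induction lst with
  | nil => intro ef pf; simp [pvBBuild, pvFirstE]
  | cons p rest ih =>
    intro ef pf
    obtain ⟨index, token⟩ := p
    simp only [pvBBuild, pvFirstE]
    rw [ih]
    by_cases ht : (token == o) = true
    · have hto : token = o := by simpa using ht
      subst hto
      rw [PySem.Dict.get?_setdefault_self]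
      cases hef : ef.get? token <;> simp [Option.or]
    · have hne : o ≠ token := fun h => ht (by simp [h])
      rw [if_neg ht, PySem.Dict.get?_setdefault_of_ne (hne := hne)]

theorem pvFoldSetdefault_get? (iv : Int × String) (o : String) :
    ∀ (keys : List String) (pf : PySem.Dict String (Int × String)),
      (keys.foldl (fun d key => d.setdefault key iv) pf).get? o =
        (pf.get? o).or (if o ∈ keys then some iv else none) := by
  intro keys
  induction keys with
  | nil => intro pf; cases h : pf.get? o <;> simp [Option.or, h]
  | cons key rest ih =>
    intro pf
    simp only [List.foldl_cons]
    rw [ih]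
    by_cases hk : o = key
    · subst hk
      rw [PySem.Dict.get?_setdefault_self]
      cases h : pf.get? o <;> by_cases hm : o ∈ rest <;> simp [hm, Option.or]
    · rw [PySem.Dict.get?_setdefault_of_ne (hne := hk)]
      by_cases hm : o ∈ rest <;> simp [hm, hk, List.mem_cons]

theorem pvBBuild_snd_get? (tokens : List String) (o : String) :
    ∀ (lst : List (Int × String)) (ef pf : PySem.Dict String (Int × String)),
      (pvBBuild tokens lst ef pf).2.get? o = (pf.get? o).or (pvFirstP o lst) := by
  intro lst
  induction lst with
  | nil => intro ef pf; simp [pvBBuild, pvFirstP]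
  | cons p rest ih =>
    intro ef pf
    obtain ⟨index, token⟩ := p
    simp only [pvBBuild, pvFirstP]
    rw [ih]
    by_cases hs : PySem.Str.startswith token (o ++ "=") = true
    · have hmem : o ∈ pvEqPrefixKeys token := (pvKeys_mem token o).mpr hs
      have hne : ¬ (pvEqPrefixKeys token).isEmpty = true := by
        cases hkeys : pvEqPrefixKeys token with
        | nil => rw [hkeys] at hmem; simp at hmem
        | cons a b => simp
      rw [if_neg hne, if_pos hs, pvFoldSetdefault_get?]
      rw [if_pos hmem]
      cases h : pf.get? o <;> simp [Option.or]
    · have hmem : o ∉ pvEqPrefixKeys token := fun h => hs ((pvKeys_mem token o).mp h)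
      rw [if_neg hs]
      by_cases hne : (pvEqPrefixKeys token).isEmpty = true
      · rw [if_pos hne]
      · rw [if_neg hne, pvFoldSetdefault_get?, if_neg hmem]
        cases h : pf.get? o <;> simp [Option.or]

theorem pvFirstE_later (tokens : List String) (o : String) (i : Int) :
    ∀ (lst : List (Int × String)), (∀ q ∈ lst, i < q.1) →
      ∀ e, pvFirstE tokens o lst = some e → i < e.1 := by
  intro lst
  induction lst with
  | nil => intro _ e h; simp [pvFirstE] at h
  | cons p rest ih =>
    intro hall e h
    obtain ⟨index, token⟩ := p
    simp only [pvFirstE] at h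
    by_cases ht : (token == o) = true
    · rw [if_pos ht] at h
      cases h
      exact hall (index, token) List.mem_cons_self
    · rw [if_neg ht] at h
      exact ih (fun q hq => hall q (List.mem_cons_of_mem _ hq)) e h

theorem pvFirstP_later (o : String) (i : Int) :
    ∀ (lst : List (Int × String)), (∀ q ∈ lst, i < q.1) →
      ∀ e, pvFirstP o lst = some e → i < e.1 := by
  intro lst
  induction lst with
  | nil => intro _ e h; simp [pvFirstP] at h
  | cons p rest ih =>
    intro hall e h
    obtain ⟨index, token⟩ := p
    simp only [pvFirstP] at h
    by_cases ht : PySem.Str.startswith token (o ++ "=") = true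
    · rw [if_pos ht] at h
      cases h
      exact hall (index, token) List.mem_cons_self
    · rw [if_neg ht] at h
      exact ih (fun q hq => hall q (List.mem_cons_of_mem _ hq)) e h

-- a token equal to the option cannot also carry "option=" as a prefix
theorem pvExactNotPrefix (o : String) : ¬ PySem.Str.startswith o (o ++ "=") = true := by
  intro h
  rw [show PySem.Str.startswith o (o ++ "=") = PySem.Chars.startswith o.toList (o ++ "=").toList from rfl,
    PySem.Chars.startswith_iff] at h
  have := h.length_le
  simp at this

-- A's first match is the earlier of the first exact hit and the first prefix hit
theorem pvMerge (tokens : List String) (o : String) :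
    ∀ (lst : List (Int × String)), List.Pairwise (fun p q : Int × String => p.1 < q.1) lst →
      pvFFind tokens o lst =
        (match pvFirstE tokens o lst, pvFirstP o lst with
          | some e, some p => if e.1 < p.1 then some e else some p
          | some e, none => some e
          | none, some p => some p
          | none, none => none) := by
  intro lst
  induction lst with
  | nil => intro _; simp [pvFFind, pvFirstE, pvFirstP]
  | cons q rest ih =>
    intro hpw
    obtain ⟨index, token⟩ := q
    obtain ⟨hhead, htail⟩ := List.pairwise_cons.mp hpw
    simp only [pvFFind, pvFirstE, pvFirstP, pvMatch]
    by_cases ht : (token == o) = true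
    · have hto : token = o := by simpa using ht
      have hs : ¬ PySem.Str.startswith token (o ++ "=") = true := by
        rw [hto]; exact pvExactNotPrefix o
      rw [if_pos ht, if_pos ht, if_neg hs]
      cases hp : pvFirstP o rest with
      | none => simp
      | some p =>
        have := pvFirstP_later o index rest hhead p hp
        simp [if_pos this]
    · rw [if_neg ht, if_neg ht]
      by_cases hs : PySem.Str.startswith token (o ++ "=") = true
      · rw [if_pos hs, if_pos hs]
        cases he : pvFirstE tokens o rest with
        | none => simp
        | some e =>
          have := pvFirstE_later tokens o index rest hhead e he
          have hne : ¬ e.1 < index := by omega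
          simp [if_neg hne]
      · rw [if_neg hs, if_neg hs]
        exact ih htail

theorem pvResolve2_eq (tokens : List String) (ef pf : PySem.Dict String (Int × String)) :
    ∀ (opts : List String),
      (∀ o ∈ opts, ef.get? o = pvFirstE tokens o (PySem.List.enumerate tokens)) →
      (∀ o ∈ opts, pf.get? o = pvFirstP o (PySem.List.enumerate tokens)) →
      pvBResolve2 ef pf opts = pvAOuter tokens opts := by
  intro opts
  induction opts with
  | nil => intro _ _; rfl
  | cons o rest ih =>
    intro hE hP
    simp only [pvBResolve2, pvAOuter]
    rw [pvAFind_eq, pvMerge tokens o _ (PySem.List.pairwise_lt_enumerate tokens 0)]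
    rw [hE o List.mem_cons_self, hP o List.mem_cons_self]
    cases he : pvFirstE tokens o (PySem.List.enumerate tokens) with
    | some e =>
      cases hp : pvFirstP o (PySem.List.enumerate tokens) with
      | some p => by_cases hlt : e.1 < p.1 <;> simp [hlt]
      | none => simp
    | none =>
      cases hp : pvFirstP o (PySem.List.enumerate tokens) with
      | some p => simp
      | none =>
        simpa using ih (fun o' ho' => hE o' (List.mem_cons_of_mem _ ho'))
          (fun o' ho' => hP o' (List.mem_cons_of_mem _ ho'))

-- ===== VERDICT (by name: the statement is the Claim_ definition above) =====
theorem command_option_present_py_spec : Claim_equal_command_option_present_py := by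
  intro tokens options _
  unfold Spec_command_option_present_py command_option_present_py command_option_present_py_alt
  refine (pvResolve2_eq tokens _ _ options ?_ ?_).symm
  · intro o _
    rw [pvBBuild_fst_get? tokens o (PySem.List.enumerate tokens) PySem.Dict.empty PySem.Dict.empty]
    cases h : pvFirstE tokens o (PySem.List.enumerate tokens) <;> simp [PySem.Dict.get?_empty, Option.or]
  · intro o _
    rw [pvBBuild_snd_get? tokens o (PySem.List.enumerate tokens) PySem.Dict.empty PySem.Dict.empty]
    cases h : pvFirstP o (PySem.List.enumerate tokens) <;> simp [PySem.Dict.get?_empty, Option.or]
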